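-- pv_equiv track=rewrite | github.com/srinidhidodo/Character-Traits-Identification | createSavePreprocessed.py | isJudging
-- ===== SOURCE A (Python) =====
-- def isJudging(s):
--     tempL = ['ENFJ','ENTJ','ESTJ','ESFJ','INFJ','INTJ','ISTJ','ISFJ']
--     ret = []
--     for i in s:
--         if i in tempL:
--             ret.append(True)
--         else:
--             ret.append(False)
--     return ret
-- ===== SOURCE B (Python) =====
-- def isJudging(s):
--     def _valid(i):
--         return (len(i) == 4 and i[0] in 'EI' and i[1] in 'NS'
--                 and i[2] in 'FT' and i[3] == 'J')
--     return [_valid(i) for i in s]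
-- ===== Notes on version B (the rewrite author's own statement) =====
-- stated objective: idiomatic
-- what changed: Replaces the fixed 8-element membership table with a per-element structural check of the four MBTI axis positions (E/I, N/S, F/T, final J), collected by a comprehension instead of an append loop.
import Mathlib
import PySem

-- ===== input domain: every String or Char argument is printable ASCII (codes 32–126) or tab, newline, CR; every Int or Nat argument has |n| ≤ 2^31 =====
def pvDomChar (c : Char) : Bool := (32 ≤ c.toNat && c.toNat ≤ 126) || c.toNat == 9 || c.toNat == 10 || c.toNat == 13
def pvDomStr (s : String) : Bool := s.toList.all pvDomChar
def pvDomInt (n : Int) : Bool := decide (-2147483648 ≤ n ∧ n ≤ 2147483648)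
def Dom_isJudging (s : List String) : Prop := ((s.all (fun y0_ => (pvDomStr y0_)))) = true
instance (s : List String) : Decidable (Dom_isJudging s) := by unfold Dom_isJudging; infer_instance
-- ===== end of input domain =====

-- B validates each string structurally by its four MBTI axis positions instead of scanning A's fixed 8-string table (idiomatic restructuring, same cost).


-- ===== PORT A =====
def isJudging (s : List String) : List Bool :=
  let tempL := ["ENFJ","ENTJ","ESTJ","ESFJ","INFJ","INTJ","ISTJ","ISFJ"]
  s.foldl (fun ret i => if tempL.contains i then ret ++ [true] else ret ++ [false]) []

-- ===== PORT B =====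
-- len(i) == 4 and positional character checks, rendered as a match on the 4-char shape
def pvValidJ (i : String) : Bool :=
  match i.toList with
  | [a, b, c, d] => (a = 'E' || a = 'I') && (b = 'N' || b = 'S') && (c = 'F' || c = 'T') && d = 'J'
  | _ => false

def isJudging_alt (s : List String) : List Bool := s.map pvValidJ

-- ===== PRECONDITION & SPEC =====
def Spec_isJudging (s : List String) (out : List Bool) : Prop := out = isJudging_alt s
instance (s : List String) (out : List Bool) : Decidable (Spec_isJudging s out) := by unfold Spec_isJudging; infer_instance

-- ===== CLAIM (what is proved, stated in full; the proofs are below) =====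
def Claim_equal_isJudging : Prop := ∀ (s : List String), Dom_isJudging s → Spec_isJudging s (isJudging s)

-- ===== LEMMAS AND PROOFS =====

-- A's per-element table lookup agrees with B's structural check on every string
theorem pvToList_eq_iff (i t : String) : i = t ↔ i.toList = t.toList :=
  ⟨fun h => h ▸ rfl, fun h => String.toList_injective h⟩

set_option maxHeartbeats 1600000 in
theorem pvContains_eq_validJ (i : String) :
    (["ENFJ","ENTJ","ESTJ","ESFJ","INFJ","INTJ","ISTJ","ISFJ"].contains i) = pvValidJ i := by
  apply Bool.eq_iff_iff.mpr
  unfold pvValidJ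
  simp only [List.contains_eq_mem, List.mem_cons, List.not_mem_nil, or_false,
    decide_eq_true_eq, pvToList_eq_iff]
  rw [show ("ENFJ" : String).toList = ['E','N','F','J'] from by decide,
    show ("ENTJ" : String).toList = ['E','N','T','J'] from by decide,
    show ("ESTJ" : String).toList = ['E','S','T','J'] from by decide,
    show ("ESFJ" : String).toList = ['E','S','F','J'] from by decide,
    show ("INFJ" : String).toList = ['I','N','F','J'] from by decide,
    show ("INTJ" : String).toList = ['I','N','T','J'] from by decide,
    show ("ISTJ" : String).toList = ['I','S','T','J'] from by decide,
    show ("ISFJ" : String).toList = ['I','S','F','J'] from by decide]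
  generalize i.toList = l
  match l with
  | [] => simp
  | [a] => simp
  | [a, b] => simp
  | [a, b, c] => simp
  | [a, b, c, d] =>
    simp only [List.cons.injEq, and_true, Bool.and_eq_true, Bool.or_eq_true, decide_eq_true_eq]
    constructor
    · rintro (⟨rfl, rfl, rfl, rfl⟩ | ⟨rfl, rfl, rfl, rfl⟩ | ⟨rfl, rfl, rfl, rfl⟩ |
        ⟨rfl, rfl, rfl, rfl⟩ | ⟨rfl, rfl, rfl, rfl⟩ | ⟨rfl, rfl, rfl, rfl⟩ |
        ⟨rfl, rfl, rfl, rfl⟩ | ⟨rfl, rfl, rfl, rfl⟩) <;> decide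
    · rintro ⟨⟨⟨ha, hb⟩, hc⟩, rfl⟩
      rcases ha with rfl | rfl <;> rcases hb with rfl | rfl <;> rcases hc with rfl | rfl <;> tauto
  | a :: b :: c :: d :: e :: rest => simp

-- ===== VERDICT (by name: the statement is the Claim_ definition above) =====
theorem isJudging_spec : Claim_equal_isJudging := by
  intro s _
  unfold Spec_isJudging isJudging isJudging_alt
  have hfun : (fun (ret : List Bool) (i : String) =>
      if (["ENFJ","ENTJ","ESTJ","ESFJ","INFJ","INTJ","ISTJ","ISFJ"].contains i)
      then ret ++ [true] else ret ++ [false]) =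
      (fun ret i => ret ++ [(["ENFJ","ENTJ","ESTJ","ESFJ","INFJ","INTJ","ISTJ","ISFJ"].contains i)]) := by
    funext ret i
    cases hc : (["ENFJ","ENTJ","ESTJ","ESFJ","INFJ","INTJ","ISTJ","ISFJ"].contains i) <;>
      simp only [hc, if_true, if_false, Bool.false_eq_true]
  show List.foldl _ [] s = _
  rw [hfun, PySem.List.foldl_append_singleton_eq_map, List.nil_append]
  exact List.map_congr_left fun i _ => pvContains_eq_validJ i
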